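-- pv_equiv track=rewrite | github.com/mzdun/resource-scanner-mc | tools/ci/common/changelog.py | _wrapAt
-- ===== SOURCE A (Python) =====
-- def _wrapAt(length: int, para: str, firstLine: str, nextLines: str):
--     result = ""
--     line = firstLine
--     lineIsDirty = False
--     words = para.strip().split(' ')
--     for word in words:
--         wordLen = len(word)
--         if wordLen == 0:
--             continue
--
--         lineIsDirty = True
--         lineLen = len(line)
--         space = ' ' if lineLen > 0 and line[-1] != ' ' else ''
--         resultingLen = lineLen + len(space) + wordLen
--         if resultingLen <= length:
--             line = f'{line}{space}{word}'
--             continue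
--         result = f'{result}{line}\n'
--         line = f'{nextLines}{word}'
--
--     if lineIsDirty:
--         result = f'{result}{line}'
--     return result
-- ===== SOURCE B (Python) =====
-- def _wrapAt(length: int, para: str, firstLine: str, nextLines: str):
--     # Phase 1: group non-empty words into lines (first group may stay empty
--     # when the very first word does not fit after firstLine).
--     words = [w for w in para.strip().split(' ') if w]
--     if not words:
--         return ""
--     sep0 = '' if not firstLine or firstLine.endswith(' ') else ' '
--     groups = [[]]
--     cur = len(firstLine)
--     sep = len(sep0)
--     for w in words:
--         if cur + sep + len(w) <= length:
--             groups[-1].append(w)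
--             cur += sep + len(w)
--         else:
--             groups.append([w])
--             cur = len(nextLines) + len(w)
--         sep = 1
--     # Phase 2: format each group.
--     lines = [firstLine + (sep0 if groups[0] else '') + ' '.join(groups[0])]
--     lines.extend(nextLines + ' '.join(g) for g in groups[1:])
--     return '\n'.join(lines)
-- ===== Notes on version B (the rewrite author's own statement) =====
-- stated objective: alternative
-- what changed: B splits the work into two phases - first greedily group the non-empty words into lines while tracking only the running character count, then format every grouped line once and join them with newlines - instead of A's single loop that repeatedly concatenates partial strings and inspects the current line's last character each iteration.
import Mathlib
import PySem

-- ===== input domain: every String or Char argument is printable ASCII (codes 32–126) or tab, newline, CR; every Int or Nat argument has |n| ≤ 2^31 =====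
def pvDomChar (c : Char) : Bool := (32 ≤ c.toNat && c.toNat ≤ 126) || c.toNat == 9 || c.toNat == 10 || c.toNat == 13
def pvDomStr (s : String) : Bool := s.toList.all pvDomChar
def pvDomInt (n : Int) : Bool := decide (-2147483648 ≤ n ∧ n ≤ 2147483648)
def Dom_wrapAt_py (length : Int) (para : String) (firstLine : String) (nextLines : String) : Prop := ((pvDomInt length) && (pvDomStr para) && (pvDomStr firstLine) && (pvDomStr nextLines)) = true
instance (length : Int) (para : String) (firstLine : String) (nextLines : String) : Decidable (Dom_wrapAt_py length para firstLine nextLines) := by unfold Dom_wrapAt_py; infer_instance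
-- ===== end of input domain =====

-- B re-implements the greedy wrap in two phases (group words into lines, then format each line);
-- same return value as A on all inputs; objective: alternative decomposition.

-- ===== PORT A =====
-- A's loop body: state = (result, line, lineIsDirty)
def wrapAtA_step (length : Int) (nl : List Char)
    (st : List Char × List Char × Bool) (word : List Char) : List Char × List Char × Bool :=
  let (result, line, _) := st
  if (word.length : Int) = 0 then st
  else
    let lineLen : Int := line.length
    -- Python's short-circuit "lineLen > 0 and line[-1] != ' '": when line = [] the
    -- conjunction is already false, so the total pyGetD with default ' ' is exact.
    let space : List Char := if 0 < lineLen ∧ PySem.List.pyGetD line (-1) ' ' ≠ ' ' then [' '] else []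
    let resultingLen : Int := lineLen + space.length + word.length
    if resultingLen ≤ length then (result, line ++ space ++ word, true)
    else (result ++ line ++ ['\n'], nl ++ word, true)

def wrapAt_py (length : Int) (para : String) (firstLine : String) (nextLines : String) : String :=
  let words := PySem.Chars.splitOn (PySem.Chars.strip para.toList) [' ']
  let st := words.foldl (wrapAtA_step length nextLines.toList) ([], firstLine.toList, false)
  String.ofList (if st.2.2 then st.1 ++ st.2.1 else st.1)

-- ===== PORT B =====
-- B's phase-1 loop body: state = (groups most-recent-first with each group's words reversed, cur, sep)
def wrapAtB_step (length : Int) (nl : List Char)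
    (st : List (List (List Char)) × Int × Int) (w : List Char) :
    List (List (List Char)) × Int × Int :=
  match st with
  | (g :: gs, cur, sep) =>
      if cur + sep + (w.length : Int) ≤ length then ((w :: g) :: gs, cur + sep + (w.length : Int), 1)
      else ([w] :: g :: gs, (nl.length : Int) + (w.length : Int), 1)
  | ([], cur, sep) => ([], cur, sep)   -- unreachable: the groups list is never empty

-- B's phase 2: format the grouped lines (groups now first-to-last, words in order)
def wrapAtB_fmt (fl sep0 nl : List Char) : List (List (List Char)) → List Char
  | [] => []   -- unreachable
  | g0 :: rest =>
      PySem.Chars.join ['\n']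
        ((fl ++ (if g0 = [] then [] else sep0) ++ PySem.Chars.join [' '] g0)
          :: rest.map (fun g => nl ++ PySem.Chars.join [' '] g))

def wrapAt_py_alt (length : Int) (para : String) (firstLine : String) (nextLines : String) : String :=
  let words := (PySem.Chars.splitOn (PySem.Chars.strip para.toList) [' ']).filter (fun w => w ≠ [])
  if words = [] then "" else
  let fl := firstLine.toList
  let nl := nextLines.toList
  let sep0 : List Char := if fl = [] ∨ PySem.Chars.endswith fl [' '] = true then [] else [' ']
  let st := words.foldl (wrapAtB_step length nl) ([([] : List (List Char))], (fl.length : Int), (sep0.length : Int))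
  String.ofList (wrapAtB_fmt fl sep0 nl (st.1.reverse.map List.reverse))

-- ===== PRECONDITION & SPEC =====
def Spec_wrapAt_py (length : Int) (para : String) (firstLine : String) (nextLines : String) (out : String) : Prop := out = wrapAt_py_alt length para firstLine nextLines
instance (length : Int) (para : String) (firstLine : String) (nextLines : String) (out : String) : Decidable (Spec_wrapAt_py length para firstLine nextLines out) := by unfold Spec_wrapAt_py; infer_instance

-- ===== CLAIM (what is proved, stated in full; the proofs are below) =====
def Claim_equal_wrapAt_py : Prop := ∀ (length : Int) (para : String) (firstLine : String) (nextLines : String), Dom_wrapAt_py length para firstLine nextLines → Spec_wrapAt_py length para firstLine nextLines (wrapAt_py length para firstLine nextLines)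

-- ===== LEMMAS AND PROOFS =====

-- proof-side renderings of B's grouped state as the strings A carries
def joinW (g : List (List Char)) : List Char := PySem.Chars.join [' '] g

def fmtFirst (fl sep0 : List Char) (g : List (List Char)) : List Char :=
  fl ++ (if g = [] then [] else sep0) ++ joinW g

def fmtNext (nl : List Char) (g : List (List Char)) : List Char := nl ++ joinW g

def lineRend (fl sep0 nl : List Char) (g : List (List Char)) (gs : List (List (List Char))) : List Char :=
  if gs = [] then fmtFirst fl sep0 g.reverse else fmtNext nl g.reverse

def resRend (fl sep0 nl : List Char) : List (List (List Char)) → List Char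
  | [] => []
  | h :: t => resRend fl sep0 nl t ++ (if t = [] then fmtFirst fl sep0 h.reverse else fmtNext nl h.reverse) ++ ['\n']

def GoodWords (ws : List (List Char)) : Prop := ∀ w ∈ ws, w ≠ [] ∧ ' ' ∉ w

lemma join_append_singleton (sep w : List Char) (xs : List (List Char)) (h : xs ≠ []) :
    PySem.Chars.join sep (xs ++ [w]) = PySem.Chars.join sep xs ++ sep ++ w := by
  induction xs with
  | nil => simp at h
  | cons x t ih =>
    cases t with
    | nil => simp [PySem.Chars.join, List.intercalate]
    | cons y t2 =>
      have := ih (by simp)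
      simp only [List.cons_append, PySem.Chars.join_cons_cons] at *
      rw [this]; simp

lemma splitOn_go_no_space : ∀ (fuel : Nat) (l cur : List Char) (acc : List (List Char)),
    l.length < fuel → (∀ p ∈ acc, ' ' ∉ p) → ' ' ∉ cur →
    ∀ p ∈ PySem.Chars.splitOn.go [' '] fuel l cur acc, ' ' ∉ p := by
  intro fuel
  induction fuel with
  | zero => intro l cur acc h; omega
  | succ f ih =>
    intro l cur acc hlen hacc hcur
    cases l with
    | nil =>
      simp only [PySem.Chars.splitOn.go]
      intro p hp
      simp only [List.mem_reverse, List.mem_cons] at hp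
      rcases hp with h | h
      · subst h; simpa using hcur
      · exact hacc _ h
    | cons c rest =>
      simp only [PySem.Chars.splitOn.go]
      by_cases hpre : ([' '] : List Char).isPrefixOf (c :: rest) = true
      · simp only [hpre, if_true]
        apply ih
        · simpa using Nat.lt_of_succ_lt_succ hlen
        · intro p hp
          rcases List.mem_cons.mp hp with h | h
          · subst h; simpa using hcur
          · exact hacc _ h
        · simp
      · simp only [hpre, if_false, Bool.false_eq_true]
        apply ih
        · simpa using Nat.lt_of_succ_lt_succ hlen
        · exact hacc
        · intro hc
          rcases List.mem_cons.mp hc with h | h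
          · apply hpre; simp [List.isPrefixOf, ← h]
          · exact hcur h

lemma splitOn_no_space (s : List Char) : ∀ p ∈ PySem.Chars.splitOn s [' '], ' ' ∉ p := by
  apply splitOn_go_no_space
  · omega
  · simp
  · simp

lemma stepA_skip_empty (length : Int) (nl : List Char) (st : List Char × List Char × Bool) :
    wrapAtA_step length nl st [] = st := by
  simp [wrapAtA_step]

lemma foldlA_filter (length : Int) (nl : List Char) :
    ∀ (ws : List (List Char)) (st : List Char × List Char × Bool),
    ws.foldl (wrapAtA_step length nl) st = (ws.filter (fun w => w ≠ [])).foldl (wrapAtA_step length nl) st := by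
  intro ws
  induction ws with
  | nil => intro st; rfl
  | cons w tl ih =>
    intro st
    by_cases hw : w = []
    · subst hw
      simp [List.foldl, stepA_skip_empty, ih]
    · simp [List.foldl, hw, ih]

lemma word_last_not_space (w : List Char) (hs : ' ' ∉ w) : w.getLast? ≠ some ' ' := by
  intro hc
  exact hs (List.mem_of_getLast? hc)

lemma suffix_singleton_iff (l : List Char) (x : Char) : [x] <:+ l ↔ l.getLast? = some x := by
  constructor
  · rintro ⟨t, rfl⟩; simp
  · intro h
    cases l with
    | nil => simp at h
    | cons a t =>
      have hne : (a::t) ≠ [] := by simp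
      have hg : (a::t).getLast hne = x := by
        have := List.getLast?_eq_some_getLast (l := a::t) hne
        rw [this] at h; injection h
      refine ⟨(a::t).dropLast, ?_⟩
      rw [← hg]
      exact List.dropLast_append_getLast hne

-- A's initial separator equals B's sep0
lemma init_space (fl : List Char) :
    (if 0 < (fl.length : Int) ∧ PySem.List.pyGetD fl (-1) ' ' ≠ ' ' then ([' '] : List Char) else [])
      = (if fl = [] ∨ PySem.Chars.endswith fl [' '] = true then ([] : List Char) else [' ']) := by
  cases fl with
  | nil => simp
  | cons a t =>
    rw [PySem.List.pyGetD_neg_one (a::t) ' ' (by simp)]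
    have hiff : PySem.Chars.endswith (a::t) [' '] = true ↔ (a::t).getLast (by simp) = ' ' := by
      rw [PySem.Chars.endswith_iff, suffix_singleton_iff,
        List.getLast?_eq_some_getLast (l := a::t) (by simp)]
      constructor
      · intro h; injection h
      · intro h; rw [h]
    by_cases h : (a::t).getLast (by simp) = ' '
    · simp [h, hiff.mpr h]
    · have hend : ¬ PySem.Chars.endswith (a::t) [' '] = true := fun hc => h (hiff.mp hc)
      simp only [hend]
      simp [h]

-- evaluating A's step on a steady-state line
lemma stepA_eval (length : Int) (nl res line w : List Char)
    (hw : w ≠ []) (hne : line ≠ []) (hlast : line.getLast? ≠ some ' ') :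
    wrapAtA_step length nl (res, line, true) w =
      if (line.length : Int) + 1 + w.length ≤ length then (res, line ++ ' ' :: w, true)
      else (res ++ line ++ ['\n'], nl ++ w, true) := by
  have hlenw : ¬ ((w.length : Int) = 0) := by
    simp [hw]
  have hg : PySem.List.pyGetD line (-1) ' ' ≠ ' ' := by
    rw [PySem.List.pyGetD_neg_one line ' ' hne]
    intro hc
    exact hlast (by rw [List.getLast?_eq_some_getLast hne, hc])
  have hpos : (0 : Int) < line.length := by
    have : 0 < line.length := List.length_pos_iff.mpr hne
    exact_mod_cast this
  have hp : 0 < line.length := List.length_pos_iff.mpr hne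
  simp only [wrapAtA_step]
  rw [if_neg hlenw]
  simp [hp, hg]

lemma lineRend_push (fl sep0 nl : List Char) (g : List (List Char)) (gs : List (List (List Char)))
    (w : List Char) (hg : g ≠ []) :
    lineRend fl sep0 nl (w :: g) gs = lineRend fl sep0 nl g gs ++ ' ' :: w := by
  have hrev : g.reverse ≠ [] := by simpa using hg
  have hj := join_append_singleton [' '] w g.reverse hrev
  cases gs with
  | nil =>
    simp only [lineRend, fmtFirst, joinW, List.reverse_cons, hj]
    simp [hrev]
  | cons h t =>
    simp only [lineRend, fmtNext, joinW, List.reverse_cons, hj, reduceCtorEq, if_false]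
    simp

lemma lineRend_new (fl sep0 nl : List Char) (w : List Char) (g : List (List Char))
    (gs : List (List (List Char))) :
    lineRend fl sep0 nl [w] (g :: gs) = nl ++ w := by
  simp [lineRend, fmtNext, joinW, PySem.Chars.join, List.intercalate]

lemma resRend_push (fl sep0 nl : List Char) (g : List (List Char)) (gs : List (List (List Char))) :
    resRend fl sep0 nl (g :: gs) = resRend fl sep0 nl gs ++ lineRend fl sep0 nl g gs ++ ['\n'] := by
  cases gs <;> simp [resRend, lineRend]

-- the steady-state simulation: after the first word, the two loops stay aligned
lemma steady (length : Int) (fl sep0 nl : List Char) :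
    ∀ (ws : List (List Char)), GoodWords ws →
    ∀ (g : List (List Char)) (gs : List (List (List Char))), g ≠ [] →
    lineRend fl sep0 nl g gs ≠ [] →
    (lineRend fl sep0 nl g gs).getLast? ≠ some ' ' →
    ∃ g' gs', g' ≠ [] ∧ lineRend fl sep0 nl g' gs' ≠ [] ∧
      (lineRend fl sep0 nl g' gs').getLast? ≠ some ' ' ∧
      ws.foldl (wrapAtB_step length nl) (g :: gs, ((lineRend fl sep0 nl g gs).length : Int), 1)
        = (g' :: gs', ((lineRend fl sep0 nl g' gs').length : Int), 1) ∧
      ws.foldl (wrapAtA_step length nl) (resRend fl sep0 nl gs, lineRend fl sep0 nl g gs, true)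
        = (resRend fl sep0 nl gs', lineRend fl sep0 nl g' gs', true) := by
  intro ws
  induction ws with
  | nil =>
    intro _ g gs hg hne hlast
    exact ⟨g, gs, hg, hne, hlast, rfl, rfl⟩
  | cons w tl ih =>
    intro hgood g gs hg hne hlast
    obtain ⟨hw, hws⟩ := hgood w (by simp)
    have hgood' : GoodWords tl := fun v hv => hgood v (by simp [hv])
    have hlastw : w.getLast? ≠ some ' ' := word_last_not_space w hws
    set line := lineRend fl sep0 nl g gs with hline
    simp only [List.foldl_cons]
    rw [stepA_eval length nl _ line w hw hne hlast]
    by_cases hc : (line.length : Int) + 1 + w.length ≤ length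
    · -- the word fits on the current line
      have hBstep : wrapAtB_step length nl (g :: gs, (line.length : Int), 1) w
          = ((w :: g) :: gs, (line.length : Int) + 1 + w.length, 1) := by
        simp [wrapAtB_step, hc]
      rw [if_pos hc, hBstep]
      have hpush := lineRend_push fl sep0 nl g gs w hg
      have hlen : ((lineRend fl sep0 nl (w :: g) gs).length : Int)
          = (line.length : Int) + 1 + w.length := by
        rw [hpush, ← hline]; simp [List.length_append]; omega
      have hne' : lineRend fl sep0 nl (w :: g) gs ≠ [] := by
        rw [hpush]; simp
      have hlast' : (lineRend fl sep0 nl (w :: g) gs).getLast? = w.getLast? := by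
        rw [hpush, show line ++ ' ' :: w = (line ++ [' ']) ++ w by simp,
          List.getLast?_append_of_ne_nil _ hw]
      obtain ⟨g', gs', h1, h2, h3, h4, h5⟩ :=
        ih hgood' (w :: g) gs (by simp) hne' (by rw [hlast']; exact hlastw)
      refine ⟨g', gs', h1, h2, h3, ?_, ?_⟩
      · rw [← h4, hlen]
      · rw [← h5, hpush, hline]
    · -- start a new continuation line
      have hBstep : wrapAtB_step length nl (g :: gs, (line.length : Int), 1) w
          = ([w] :: g :: gs, (nl.length : Int) + w.length, 1) := by
        simp [wrapAtB_step, hc]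
      rw [if_neg hc, hBstep]
      have hnew := lineRend_new fl sep0 nl w g gs
      have hlen : ((lineRend fl sep0 nl [w] (g :: gs)).length : Int)
          = (nl.length : Int) + w.length := by
        rw [hnew]; simp [List.length_append]
      have hne' : lineRend fl sep0 nl [w] (g :: gs) ≠ [] := by
        rw [hnew]; simp [hw]
      have hlast' : (lineRend fl sep0 nl [w] (g :: gs)).getLast? = w.getLast? := by
        rw [hnew, List.getLast?_append_of_ne_nil _ hw]
      obtain ⟨g', gs', h1, h2, h3, h4, h5⟩ :=
        ih hgood' [w] (g :: gs) (by simp) hne' (by rw [hlast']; exact hlastw)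
      refine ⟨g', gs', h1, h2, h3, ?_, ?_⟩
      · rw [← h4, hlen]
      · rw [← h5, hnew, resRend_push, hline]
-- B's final formatting agrees with A's accumulated result
lemma fin (fl sep0 nl : List Char) :
    ∀ (gs : List (List (List Char))) (g : List (List Char)),
    wrapAtB_fmt fl sep0 nl ((g :: gs).reverse.map List.reverse)
      = resRend fl sep0 nl gs ++ lineRend fl sep0 nl g gs := by
  intro gs
  induction gs with
  | nil =>
    intro g
    simp [wrapAtB_fmt, resRend, lineRend, fmtFirst, joinW, PySem.Chars.join, List.intercalate]
  | cons h t ih =>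
    intro g
    have hne : ((h :: t).reverse.map List.reverse) ≠ [] := by simp
    obtain ⟨x0, xs, hx⟩ := List.exists_cons_of_ne_nil hne
    have hLHS : (g :: h :: t).reverse.map List.reverse
        = x0 :: (xs ++ [g.reverse]) := by
      rw [show (g :: h :: t).reverse = (h :: t).reverse ++ [g] by simp]
      rw [List.map_append, hx]; simp
    rw [hLHS]
    simp only [wrapAtB_fmt, List.map_append, List.map_cons, List.map_nil]
    rw [show (fl ++ (if x0 = [] then [] else sep0) ++ PySem.Chars.join [' '] x0)
          :: (xs.map (fun gg => nl ++ PySem.Chars.join [' '] gg) ++ [nl ++ PySem.Chars.join [' '] g.reverse])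
        = ((fl ++ (if x0 = [] then [] else sep0) ++ PySem.Chars.join [' '] x0)
          :: xs.map (fun gg => nl ++ PySem.Chars.join [' '] gg)) ++ [nl ++ PySem.Chars.join [' '] g.reverse] by simp]
    rw [join_append_singleton _ _ _ (by simp)]
    have hih := ih h
    rw [hx] at hih
    simp only [wrapAtB_fmt] at hih
    rw [hih, resRend_push]
    simp [lineRend, fmtNext, joinW]

-- evaluating A's step on the initial state
lemma stepA_init (length : Int) (nl fl w : List Char) (hw : w ≠ []) :
    wrapAtA_step length nl ([], fl, false) w =
      (if (fl.length : Int) + ((if fl = [] ∨ PySem.Chars.endswith fl [' '] = true then ([] : List Char) else [' ']).length : Int) + w.length ≤ length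
        then ([], fl ++ (if fl = [] ∨ PySem.Chars.endswith fl [' '] = true then ([] : List Char) else [' ']) ++ w, true)
        else (fl ++ ['\n'], nl ++ w, true)) := by
  have hlenw : ¬ ((w.length : Int) = 0) := by simp [hw]
  simp only [wrapAtA_step]
  rw [if_neg hlenw, init_space]
  simp

-- ===== VERDICT (by name: the statement is the Claim_ definition above) =====
theorem wrapAt_py_spec : Claim_equal_wrapAt_py := by
  intro length para firstLine nextLines _
  unfold Spec_wrapAt_py wrapAt_py wrapAt_py_alt
  simp only
  rw [foldlA_filter]
  set fl := firstLine.toList with hfl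
  set nl := nextLines.toList with hnl
  set s := PySem.Chars.strip para.toList with hs
  set ws := (PySem.Chars.splitOn s [' ']).filter (fun w => w ≠ []) with hws
  set sep0 := (if fl = [] ∨ PySem.Chars.endswith fl [' '] = true then ([] : List Char) else [' ']) with hsep0
  have hgood : GoodWords ws := by
    intro w hw
    rw [hws] at hw
    have h2 := List.mem_filter.mp hw
    exact ⟨by simpa using h2.2, splitOn_no_space s w h2.1⟩
  cases hcase : ws with
  | nil => simp
  | cons w tl =>
    rw [if_neg (show ¬ (w :: tl = []) by simp)]
    have hgood2 : GoodWords (w :: tl) := by rw [← hcase]; exact hgood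
    obtain ⟨hw, hwsp⟩ := hgood2 w (by simp)
    have hgood' : GoodWords tl := fun v hv => hgood2 v (by simp [hv])
    simp only [List.foldl_cons]
    rw [stepA_init length nl fl w hw, ← hsep0]
    have hBstep : wrapAtB_step length nl ([([] : List (List Char))], (fl.length : Int), (sep0.length : Int)) w
        = if (fl.length : Int) + (sep0.length : Int) + w.length ≤ length
            then ([[w]], (fl.length : Int) + (sep0.length : Int) + (w.length : Int), 1)
            else ([[w], []], (nl.length : Int) + (w.length : Int), 1) := by
      by_cases hc : (fl.length : Int) + (sep0.length : Int) + w.length ≤ length <;>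
        simp [wrapAtB_step, hc]
    rw [hBstep]
    by_cases hc : (fl.length : Int) + (sep0.length : Int) + w.length ≤ length
    · rw [if_pos hc, if_pos hc]
      have hl1 : lineRend fl sep0 nl [w] [] = fl ++ sep0 ++ w := by
        simp [lineRend, fmtFirst, joinW, PySem.Chars.join, List.intercalate]
      have hlen : ((lineRend fl sep0 nl [w] []).length : Int)
          = (fl.length : Int) + (sep0.length : Int) + w.length := by
        rw [hl1]; push_cast [List.length_append]; ring
      have hne : lineRend fl sep0 nl [w] [] ≠ [] := by rw [hl1]; simp [hw]
      have hlast : (lineRend fl sep0 nl [w] []).getLast? ≠ some ' ' := by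
        rw [hl1, show fl ++ sep0 ++ w = (fl ++ sep0) ++ w by simp,
          List.getLast?_append_of_ne_nil _ hw]
        exact word_last_not_space w hwsp
      obtain ⟨g', gs', _, _, _, h4, h5⟩ :=
        steady length fl sep0 nl tl hgood' [w] [] (by simp) hne hlast
      rw [← hlen, h4]
      have h5' : List.foldl (wrapAtA_step length nl) ([], fl ++ sep0 ++ w, true) tl
          = (resRend fl sep0 nl gs', lineRend fl sep0 nl g' gs', true) := by
        rw [← hl1, show ([] : List Char) = resRend fl sep0 nl [] from rfl]
        exact h5
      rw [h5', fin]
      simp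
    · rw [if_neg hc, if_neg hc]
      have hl1 : lineRend fl sep0 nl [w] [[]] = nl ++ w := lineRend_new fl sep0 nl w [] []
      have hres : resRend fl sep0 nl [[]] = fl ++ ['\n'] := by
        simp [resRend, fmtFirst, joinW, PySem.Chars.join, List.intercalate]
      have hlen : ((lineRend fl sep0 nl [w] [[]]).length : Int)
          = (nl.length : Int) + w.length := by
        rw [hl1]; push_cast [List.length_append]; ring
      have hne : lineRend fl sep0 nl [w] [[]] ≠ [] := by rw [hl1]; simp [hw]
      have hlast : (lineRend fl sep0 nl [w] [[]]).getLast? ≠ some ' ' := by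
        rw [hl1, List.getLast?_append_of_ne_nil _ hw]
        exact word_last_not_space w hwsp
      obtain ⟨g', gs', _, _, _, h4, h5⟩ :=
        steady length fl sep0 nl tl hgood' [w] [[]] (by simp) hne hlast
      rw [← hlen, h4]
      have h5' : List.foldl (wrapAtA_step length nl) (fl ++ ['\n'], nl ++ w, true) tl
          = (resRend fl sep0 nl gs', lineRend fl sep0 nl g' gs', true) := by
        rw [← hl1, ← hres]
        exact h5
      rw [h5', fin]
      simp
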